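-- pv_equiv track=rewrite | github.com/huseyinwural-lab/ilan_sitesi_1 | backend/app/dependencies.py | _infer_required_portal_scope
-- ===== SOURCE A (Python) =====
-- from typing import Optional
--
-- ADMIN_ROLES = {
--     "super_admin",
--     "country_admin",
--     "moderator",
--     "support",
--     "finance",
--     "campaigns_admin",
--     "campaigns_supervisor",
--     "ROLE_AUDIT_VIEWER",
--     "audit_viewer",
-- }
--
-- DEALER_ROLES = {"dealer"}
--
-- def _infer_required_portal_scope(required_roles: Optional[list]) -> Optional[str]:
--     if not required_roles:
--         return None
--     if any(role in DEALER_ROLES for role in required_roles):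
--         return "dealer"
--     if any(role in ADMIN_ROLES for role in required_roles):
--         return "admin"
--     return "account"
-- ===== SOURCE B (Python) =====
-- from typing import Optional
--
-- ADMIN_ROLES = {
--     "super_admin",
--     "country_admin",
--     "moderator",
--     "support",
--     "finance",
--     "campaigns_admin",
--     "campaigns_supervisor",
--     "ROLE_AUDIT_VIEWER",
--     "audit_viewer",
-- }
--
-- DEALER_ROLES = {"dealer"}
--
-- # Precomputed priority table: dealer outranks admin outranks plain account roles.
-- _SCOPE_RANK = {"dealer": 2}
-- for _role in ADMIN_ROLES:
--     _SCOPE_RANK[_role] = 1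
--
-- _SCOPE_BY_RANK = ("account", "admin", "dealer")
--
-- def _infer_required_portal_scope(required_roles: Optional[list]) -> Optional[str]:
--     if not required_roles:
--         return None
--     best = 0
--     for role in required_roles:
--         best = max(best, _SCOPE_RANK.get(role, 0))
--     return _SCOPE_BY_RANK[best]
-- ===== Notes on version B (the rewrite author's own statement) =====
-- stated objective: alternative
-- what changed: Replaces A's two short-circuiting set-membership any() scans with a priority-arithmetic reduction: each role is mapped through a precomputed rank table (dealer=2, admin=1, other=0), the maximum rank is folded over the list, and the result is read off a rank-indexed tuple.
import Mathlib
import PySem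

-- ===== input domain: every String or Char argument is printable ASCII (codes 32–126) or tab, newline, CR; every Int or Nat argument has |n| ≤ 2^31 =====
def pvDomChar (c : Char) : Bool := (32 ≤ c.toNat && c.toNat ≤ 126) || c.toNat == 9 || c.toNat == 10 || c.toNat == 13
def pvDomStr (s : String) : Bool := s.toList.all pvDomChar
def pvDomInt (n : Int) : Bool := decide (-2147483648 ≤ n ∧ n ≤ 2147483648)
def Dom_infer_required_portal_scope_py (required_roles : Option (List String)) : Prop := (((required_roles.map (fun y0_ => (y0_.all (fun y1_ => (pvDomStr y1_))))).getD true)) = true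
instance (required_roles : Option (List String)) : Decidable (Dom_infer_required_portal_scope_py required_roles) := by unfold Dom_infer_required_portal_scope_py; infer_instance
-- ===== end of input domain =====

-- B replaces A's two short-circuiting membership scans by a rank-table lookup folded through max; alternative decomposition, same cost.

-- ===== PORT A =====
def pvAdminRoles : List String :=
  ["super_admin", "country_admin", "moderator", "support", "finance",
   "campaigns_admin", "campaigns_supervisor", "ROLE_AUDIT_VIEWER", "audit_viewer"]

def pvDealerRoles : List String := ["dealer"]

def infer_required_portal_scope_py (required_roles : Option (List String)) : Option String :=
  match required_roles with
  | none => none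
  | some roles =>
    if roles = [] then none
    else if roles.any (fun role => pvDealerRoles.contains role) then some "dealer"
    else if roles.any (fun role => pvAdminRoles.contains role) then some "admin"
    else some "account"

-- ===== PORT B =====
-- _SCOPE_RANK: "dealer" -> 2, then every admin role -> 1 (values all equal 1, so the
-- arbitrary CPython set iteration order is immaterial; ported in declared order).
def pvScopeRank : PySem.Dict String Int :=
  (((((((((PySem.Dict.empty.insert "dealer" 2).insert "super_admin" 1).insert "country_admin" 1).insert
      "moderator" 1).insert "support" 1).insert "finance" 1).insert "campaigns_admin" 1).insert
      "campaigns_supervisor" 1).insert "ROLE_AUDIT_VIEWER" 1).insert "audit_viewer" 1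

def pvScopeByRank : List String := ["account", "admin", "dealer"]

def infer_required_portal_scope_py_alt (required_roles : Option (List String)) : Option String :=
  match required_roles with
  | none => none
  | some roles =>
    if roles = [] then none
    else
      let best := roles.foldl (fun b role => max b (pvScopeRank.getD role 0)) 0
      PySem.List.pyGet? pvScopeByRank best

-- ===== PRECONDITION & SPEC =====
def Spec_infer_required_portal_scope_py (required_roles : Option (List String)) (out : Option String) : Prop := out = infer_required_portal_scope_py_alt required_roles
instance (required_roles : Option (List String)) (out : Option String) : Decidable (Spec_infer_required_portal_scope_py required_roles out) := by unfold Spec_infer_required_portal_scope_py; infer_instance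

-- ===== CLAIM (what is proved, stated in full; the proofs are below) =====
def Claim_equal_infer_required_portal_scope_py : Prop := ∀ (required_roles : Option (List String)), Dom_infer_required_portal_scope_py required_roles → Spec_infer_required_portal_scope_py required_roles (infer_required_portal_scope_py required_roles)

-- ===== LEMMAS AND PROOFS =====

/-- The rank a single role gets from the table, characterised by A's two membership tests. -/
theorem pvScopeRank_getD (role : String) :
    pvScopeRank.getD role 0
      = (if pvDealerRoles.contains role then 2
         else if pvAdminRoles.contains role then 1 else 0) := by
  simp only [pvScopeRank, PySem.Dict.getD_insert, PySem.Dict.getD_empty, pvDealerRoles,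
    pvAdminRoles, List.contains_cons, List.contains_nil]
  by_cases h1 : role = "dealer" <;> by_cases h2 : role = "super_admin" <;>
  by_cases h3 : role = "country_admin" <;> by_cases h4 : role = "moderator" <;>
  by_cases h5 : role = "support" <;> by_cases h6 : role = "finance" <;>
  by_cases h7 : role = "campaigns_admin" <;> by_cases h8 : role = "campaigns_supervisor" <;>
  by_cases h9 : role = "ROLE_AUDIT_VIEWER" <;> by_cases h10 : role = "audit_viewer" <;>
  simp_all

/-- The max-fold computes the peak rank: 2 if any dealer role, else 1 if any admin role, else 0. -/
theorem pvFold_max (roles : List String) : ∀ (b : Int), 0 ≤ b →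
    roles.foldl (fun b role => max b (pvScopeRank.getD role 0)) b
      = max b (if roles.any (fun role => pvDealerRoles.contains role) then 2
               else if roles.any (fun role => pvAdminRoles.contains role) then 1 else 0) := by
  induction roles with
  | nil => intro b hb; simp; omega
  | cons r rs ih =>
    intro b hb
    rw [List.foldl_cons, ih _ (le_max_of_le_left hb), List.any_cons, List.any_cons,
      pvScopeRank_getD]
    cases hd : pvDealerRoles.contains r <;>
    cases ha : pvAdminRoles.contains r <;>
    cases hds : rs.any (fun role => pvDealerRoles.contains role) <;>
    cases has : rs.any (fun role => pvAdminRoles.contains role) <;>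
      simp [hds, has] <;> try omega

-- ===== VERDICT (by name: the statement is the Claim_ definition above) =====
theorem infer_required_portal_scope_py_spec : Claim_equal_infer_required_portal_scope_py := by
  intro rs _
  unfold Spec_infer_required_portal_scope_py infer_required_portal_scope_py infer_required_portal_scope_py_alt
  cases rs with
  | none => rfl
  | some roles =>
    dsimp only
    by_cases he : roles = []
    · simp [he]
    · rw [if_neg he, if_neg he]
      show _ = PySem.List.pyGet? pvScopeByRank
        (roles.foldl (fun b role => max b (pvScopeRank.getD role 0)) 0)
      rw [pvFold_max roles 0 le_rfl]
      cases hd : roles.any (fun role => pvDealerRoles.contains role) <;>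
      cases ha : roles.any (fun role => pvAdminRoles.contains role) <;>
        simp [hd, ha] <;> rfl
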